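-- pv_equiv track=rewrite | github.com/EricwanAR/DAminoMuta | dataset.py | build_peptide_smiles
-- ===== SOURCE A (Python) =====
-- aa_side = {
--     "A": "C", "R": "CCCNC(N)=N", "N": "CC(=O)N", "D": "CC(=O)O", "C": "CS",
--     "E": "CCC(=O)O", "Q": "CCC(=O)N", "G": "", "H": "Cc1cnc[nH]1", "I": "C(C)CC",
--     "L": "CC(C)C", "K": "CCCCN", "M": "CCSC", "F": "Cc1ccccc1", "P": "C1CCN1",
--     "S": "CO", "T": "C(C)O", "W": "Cc1c[nH]c2ccccc12", "Y": "Cc1ccc(O)cc1", "V": "C(C)C"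
-- }
--
-- def build_peptide_smiles(seq: str) -> str:
--     tpl = {}
--     for aa, R in aa_side.items():
--         for stereo, chir in (("L", "@"), ("D", "@@")):
--             if aa == "G":
--                 backbone = "N[C:{idx}]C"
--             else:
--                 backbone = f"N[C{chir}H:{'{idx}'}]({R})C"
--             tpl[f"{aa}_{stereo}"]       = backbone + "(=O)"
--             tpl[f"{aa}_{stereo}_term"]  = backbone + "(=O)O"
--
--     if not seq:
--         return ""
--
--     out = []
--     n = len(seq)
--     for i, aa in enumerate(seq, start=1):
--         key = f"{aa.upper()}_{'L' if aa.isupper() else 'D'}"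
--         if i == n:
--             key += "_term"
--         out.append(tpl[key].format(idx=i))
--     return "".join(out)
-- ===== SOURCE B (Python) =====
-- aa_side = {
--     "A": "C", "R": "CCCNC(N)=N", "N": "CC(=O)N", "D": "CC(=O)O", "C": "CS",
--     "E": "CCC(=O)O", "Q": "CCC(=O)N", "G": "", "H": "Cc1cnc[nH]1", "I": "C(C)CC",
--     "L": "CC(C)C", "K": "CCCCN", "M": "CCSC", "F": "Cc1ccccc1", "P": "C1CCN1",
--     "S": "CO", "T": "C(C)O", "W": "Cc1c[nH]c2ccccc12", "Y": "Cc1ccc(O)cc1", "V": "C(C)C"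
-- }
--
--
-- def _residue(aa: str, i: int, last: bool) -> str:
--     u = aa.upper()
--     side = aa_side[u]
--     if u == "G":
--         core = f"N[C:{i}]C"
--     else:
--         chir = "@" if aa.isupper() else "@@"
--         core = f"N[C{chir}H:{i}]({side})C"
--     return core + ("(=O)O" if last else "(=O)")
--
--
-- def build_peptide_smiles(seq: str) -> str:
--     n = len(seq)
--     return "".join(_residue(aa, i, i == n) for i, aa in enumerate(seq, start=1))
-- ===== Notes on version B (the rewrite author's own statement) =====
-- stated objective: simpler
-- what changed: B drops A's 80-entry template table (the nested dict-population loop and the '{idx}' placeholder formatting) and instead builds each residue's SMILES fragment directly in a single pass over enumerate(seq, 1).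
import Mathlib
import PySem

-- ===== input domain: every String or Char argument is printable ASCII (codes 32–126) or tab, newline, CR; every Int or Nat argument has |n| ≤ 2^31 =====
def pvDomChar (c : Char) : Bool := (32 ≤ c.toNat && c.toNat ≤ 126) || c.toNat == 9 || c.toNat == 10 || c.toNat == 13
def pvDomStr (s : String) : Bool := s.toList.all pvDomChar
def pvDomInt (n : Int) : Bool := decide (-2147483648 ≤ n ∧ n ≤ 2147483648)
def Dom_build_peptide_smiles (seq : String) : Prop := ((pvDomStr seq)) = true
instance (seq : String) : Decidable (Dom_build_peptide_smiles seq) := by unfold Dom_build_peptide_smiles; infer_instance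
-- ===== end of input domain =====

-- B drops A's 80-entry template table and its nested population loop, computing each residue
-- directly in one pass (objective: simpler). Equivalence of the RETURN value is proved on Pre_.

-- shared module constant aa_side (dict, insertion order), kept as List Char strings
def aaSide : List (List Char × List Char) := [("A".toList, "C".toList), ("R".toList, "CCCNC(N)=N".toList), ("N".toList, "CC(=O)N".toList), ("D".toList, "CC(=O)O".toList), ("C".toList, "CS".toList), ("E".toList, "CCC(=O)O".toList), ("Q".toList, "CCC(=O)N".toList), ("G".toList, "".toList), ("H".toList, "Cc1cnc[nH]1".toList), ("I".toList, "C(C)CC".toList), ("L".toList, "CC(C)C".toList), ("K".toList, "CCCCN".toList), ("M".toList, "CCSC".toList), ("F".toList, "Cc1ccccc1".toList), ("P".toList, "C1CCN1".toList), ("S".toList, "CO".toList), ("T".toList, "C(C)O".toList), ("W".toList, "Cc1c[nH]c2ccccc12".toList), ("Y".toList, "Cc1ccc(O)cc1".toList), ("V".toList, "C(C)C".toList)]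

-- ===== PORT A =====
-- A-side helper: the tpl table A builds (input-independent, hoisted; the nested loop is this foldl)
def tplA : PySem.Dict (List Char) (List Char) :=
  aaSide.foldl (fun d p =>
    [("L".toList, "@".toList), ("D".toList, "@@".toList)].foldl (fun d q =>
      let backbone := if p.1 = "G".toList then "N[C:{idx}]C".toList
        else "N[C".toList ++ q.2 ++ "H:{idx}](".toList ++ p.2 ++ ")C".toList
      (d.insert (p.1 ++ "_".toList ++ q.1) (backbone ++ "(=O)".toList)).insert
        (p.1 ++ "_".toList ++ q.1 ++ "_term".toList) (backbone ++ "(=O)O".toList)) d)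
    PySem.Dict.empty

-- A's loop body: key = f"{aa.upper()}_{'L' if aa.isupper() else 'D'}" (+ "_term"), then
-- tpl[key].format(idx=i).  tpl[key] is getD (KeyError excluded by Pre_); .format inserts str(i).
def pieceA (c : Char) (i : Int) (t : Bool) : List Char :=
  let key := [PySem.Chars.upperChar c] ++ "_".toList ++
    (if PySem.Chars.isupper c then "L".toList else "D".toList)
  let key := if t then key ++ "_term".toList else key
  PySem.Chars.replace (tplA.getD key []) "{idx}".toList (PySem.Int.toChars i)

def build_peptide_smiles (seq : String) : String :=
  if seq.toList = [] then "" else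
    String.ofList (PySem.Chars.join [] ((PySem.List.enumerate seq.toList 1).foldl
      (fun out p => out ++ [pieceA p.2 p.1 (p.1 = (seq.toList.length : Int))]) []))

-- ===== PORT B =====
-- B's helper _residue(aa, i, last); aa_side[u] is getD (KeyError excluded by Pre_)
def residueB (c : Char) (i : Int) (last : Bool) : List Char :=
  let u := [PySem.Chars.upperChar c]
  let side := (PySem.Dict.mk aaSide).getD u []
  let core := if u = "G".toList then "N[C:".toList ++ PySem.Int.toChars i ++ "]C".toList
    else "N[C".toList ++ (if PySem.Chars.isupper c then "@".toList else "@@".toList) ++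
      "H:".toList ++ PySem.Int.toChars i ++ "](".toList ++ side ++ ")C".toList
  core ++ (if last then "(=O)O".toList else "(=O)".toList)

def build_peptide_smiles_alt (seq : String) : String :=
  String.ofList (PySem.Chars.join []
    ((PySem.List.enumerate seq.toList 1).map
      (fun p => residueB p.2 p.1 (p.1 = (seq.toList.length : Int)))))

-- the residue characters both programs accept (upper- or lower-case amino-acid codes)
def allowedChars : List Char := ['A', 'R', 'N', 'D', 'C', 'E', 'Q', 'G', 'H', 'I', 'L', 'K', 'M', 'F', 'P', 'S', 'T', 'W', 'Y', 'V', 'a', 'r', 'n', 'd', 'c', 'e', 'q', 'g', 'h', 'i', 'l', 'k', 'm', 'f', 'p', 's', 't', 'w', 'y', 'v']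

-- ===== PRECONDITION & SPEC =====
-- Pre_ excludes exactly the inputs where both Pythons raise KeyError: a character whose
-- uppercase is not one of the 20 amino-acid codes.
def Pre_build_peptide_smiles (seq : String) : Prop :=
  (seq.toList.all (fun c => allowedChars.contains c)) = true
instance (seq : String) : Decidable (Pre_build_peptide_smiles seq) := by
  unfold Pre_build_peptide_smiles; infer_instance
def pvWitness_build_peptide_smiles : String := "Ga"

def Spec_build_peptide_smiles (seq : String) (out : String) : Prop := out = build_peptide_smiles_alt seq
instance (seq : String) (out : String) : Decidable (Spec_build_peptide_smiles seq out) := by unfold Spec_build_peptide_smiles; infer_instance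

-- ===== CLAIM (what is proved, stated in full; the proofs are below) =====
def Claim_equal_build_peptide_smiles : Prop := ∀ (seq : String), Dom_build_peptide_smiles seq → Pre_build_peptide_smiles seq → Spec_build_peptide_smiles seq (build_peptide_smiles seq)

-- ===== LEMMAS AND PROOFS =====

set_option maxRecDepth 40000
set_option maxHeartbeats 1000000

-- the 80 entries of A's template table, evaluated once
@[simp] lemma tplA_1 : tplA.get? ['A', '_', 'L'] = some ['N', '[', 'C', '@', 'H', ':', '{', 'i', 'd', 'x', '}', ']', '(', 'C', ')', 'C', '(', '=', 'O', ')'] := by decide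
@[simp] lemma tplA_2 : tplA.get? ['A', '_', 'L', '_', 't', 'e', 'r', 'm'] = some ['N', '[', 'C', '@', 'H', ':', '{', 'i', 'd', 'x', '}', ']', '(', 'C', ')', 'C', '(', '=', 'O', ')', 'O'] := by decide
@[simp] lemma tplA_3 : tplA.get? ['A', '_', 'D'] = some ['N', '[', 'C', '@', '@', 'H', ':', '{', 'i', 'd', 'x', '}', ']', '(', 'C', ')', 'C', '(', '=', 'O', ')'] := by decide
@[simp] lemma tplA_4 : tplA.get? ['A', '_', 'D', '_', 't', 'e', 'r', 'm'] = some ['N', '[', 'C', '@', '@', 'H', ':', '{', 'i', 'd', 'x', '}', ']', '(', 'C', ')', 'C', '(', '=', 'O', ')', 'O'] := by decide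
@[simp] lemma tplA_5 : tplA.get? ['R', '_', 'L'] = some ['N', '[', 'C', '@', 'H', ':', '{', 'i', 'd', 'x', '}', ']', '(', 'C', 'C', 'C', 'N', 'C', '(', 'N', ')', '=', 'N', ')', 'C', '(', '=', 'O', ')'] := by decide
@[simp] lemma tplA_6 : tplA.get? ['R', '_', 'L', '_', 't', 'e', 'r', 'm'] = some ['N', '[', 'C', '@', 'H', ':', '{', 'i', 'd', 'x', '}', ']', '(', 'C', 'C', 'C', 'N', 'C', '(', 'N', ')', '=', 'N', ')', 'C', '(', '=', 'O', ')', 'O'] := by decide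
@[simp] lemma tplA_7 : tplA.get? ['R', '_', 'D'] = some ['N', '[', 'C', '@', '@', 'H', ':', '{', 'i', 'd', 'x', '}', ']', '(', 'C', 'C', 'C', 'N', 'C', '(', 'N', ')', '=', 'N', ')', 'C', '(', '=', 'O', ')'] := by decide
@[simp] lemma tplA_8 : tplA.get? ['R', '_', 'D', '_', 't', 'e', 'r', 'm'] = some ['N', '[', 'C', '@', '@', 'H', ':', '{', 'i', 'd', 'x', '}', ']', '(', 'C', 'C', 'C', 'N', 'C', '(', 'N', ')', '=', 'N', ')', 'C', '(', '=', 'O', ')', 'O'] := by decide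
@[simp] lemma tplA_9 : tplA.get? ['N', '_', 'L'] = some ['N', '[', 'C', '@', 'H', ':', '{', 'i', 'd', 'x', '}', ']', '(', 'C', 'C', '(', '=', 'O', ')', 'N', ')', 'C', '(', '=', 'O', ')'] := by decide
@[simp] lemma tplA_10 : tplA.get? ['N', '_', 'L', '_', 't', 'e', 'r', 'm'] = some ['N', '[', 'C', '@', 'H', ':', '{', 'i', 'd', 'x', '}', ']', '(', 'C', 'C', '(', '=', 'O', ')', 'N', ')', 'C', '(', '=', 'O', ')', 'O'] := by decide
@[simp] lemma tplA_11 : tplA.get? ['N', '_', 'D'] = some ['N', '[', 'C', '@', '@', 'H', ':', '{', 'i', 'd', 'x', '}', ']', '(', 'C', 'C', '(', '=', 'O', ')', 'N', ')', 'C', '(', '=', 'O', ')'] := by decide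
@[simp] lemma tplA_12 : tplA.get? ['N', '_', 'D', '_', 't', 'e', 'r', 'm'] = some ['N', '[', 'C', '@', '@', 'H', ':', '{', 'i', 'd', 'x', '}', ']', '(', 'C', 'C', '(', '=', 'O', ')', 'N', ')', 'C', '(', '=', 'O', ')', 'O'] := by decide
@[simp] lemma tplA_13 : tplA.get? ['D', '_', 'L'] = some ['N', '[', 'C', '@', 'H', ':', '{', 'i', 'd', 'x', '}', ']', '(', 'C', 'C', '(', '=', 'O', ')', 'O', ')', 'C', '(', '=', 'O', ')'] := by decide
@[simp] lemma tplA_14 : tplA.get? ['D', '_', 'L', '_', 't', 'e', 'r', 'm'] = some ['N', '[', 'C', '@', 'H', ':', '{', 'i', 'd', 'x', '}', ']', '(', 'C', 'C', '(', '=', 'O', ')', 'O', ')', 'C', '(', '=', 'O', ')', 'O'] := by decide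
@[simp] lemma tplA_15 : tplA.get? ['D', '_', 'D'] = some ['N', '[', 'C', '@', '@', 'H', ':', '{', 'i', 'd', 'x', '}', ']', '(', 'C', 'C', '(', '=', 'O', ')', 'O', ')', 'C', '(', '=', 'O', ')'] := by decide
@[simp] lemma tplA_16 : tplA.get? ['D', '_', 'D', '_', 't', 'e', 'r', 'm'] = some ['N', '[', 'C', '@', '@', 'H', ':', '{', 'i', 'd', 'x', '}', ']', '(', 'C', 'C', '(', '=', 'O', ')', 'O', ')', 'C', '(', '=', 'O', ')', 'O'] := by decide
@[simp] lemma tplA_17 : tplA.get? ['C', '_', 'L'] = some ['N', '[', 'C', '@', 'H', ':', '{', 'i', 'd', 'x', '}', ']', '(', 'C', 'S', ')', 'C', '(', '=', 'O', ')'] := by decide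
@[simp] lemma tplA_18 : tplA.get? ['C', '_', 'L', '_', 't', 'e', 'r', 'm'] = some ['N', '[', 'C', '@', 'H', ':', '{', 'i', 'd', 'x', '}', ']', '(', 'C', 'S', ')', 'C', '(', '=', 'O', ')', 'O'] := by decide
@[simp] lemma tplA_19 : tplA.get? ['C', '_', 'D'] = some ['N', '[', 'C', '@', '@', 'H', ':', '{', 'i', 'd', 'x', '}', ']', '(', 'C', 'S', ')', 'C', '(', '=', 'O', ')'] := by decide
@[simp] lemma tplA_20 : tplA.get? ['C', '_', 'D', '_', 't', 'e', 'r', 'm'] = some ['N', '[', 'C', '@', '@', 'H', ':', '{', 'i', 'd', 'x', '}', ']', '(', 'C', 'S', ')', 'C', '(', '=', 'O', ')', 'O'] := by decide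
@[simp] lemma tplA_21 : tplA.get? ['E', '_', 'L'] = some ['N', '[', 'C', '@', 'H', ':', '{', 'i', 'd', 'x', '}', ']', '(', 'C', 'C', 'C', '(', '=', 'O', ')', 'O', ')', 'C', '(', '=', 'O', ')'] := by decide
@[simp] lemma tplA_22 : tplA.get? ['E', '_', 'L', '_', 't', 'e', 'r', 'm'] = some ['N', '[', 'C', '@', 'H', ':', '{', 'i', 'd', 'x', '}', ']', '(', 'C', 'C', 'C', '(', '=', 'O', ')', 'O', ')', 'C', '(', '=', 'O', ')', 'O'] := by decide
@[simp] lemma tplA_23 : tplA.get? ['E', '_', 'D'] = some ['N', '[', 'C', '@', '@', 'H', ':', '{', 'i', 'd', 'x', '}', ']', '(', 'C', 'C', 'C', '(', '=', 'O', ')', 'O', ')', 'C', '(', '=', 'O', ')'] := by decide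
@[simp] lemma tplA_24 : tplA.get? ['E', '_', 'D', '_', 't', 'e', 'r', 'm'] = some ['N', '[', 'C', '@', '@', 'H', ':', '{', 'i', 'd', 'x', '}', ']', '(', 'C', 'C', 'C', '(', '=', 'O', ')', 'O', ')', 'C', '(', '=', 'O', ')', 'O'] := by decide
@[simp] lemma tplA_25 : tplA.get? ['Q', '_', 'L'] = some ['N', '[', 'C', '@', 'H', ':', '{', 'i', 'd', 'x', '}', ']', '(', 'C', 'C', 'C', '(', '=', 'O', ')', 'N', ')', 'C', '(', '=', 'O', ')'] := by decide
@[simp] lemma tplA_26 : tplA.get? ['Q', '_', 'L', '_', 't', 'e', 'r', 'm'] = some ['N', '[', 'C', '@', 'H', ':', '{', 'i', 'd', 'x', '}', ']', '(', 'C', 'C', 'C', '(', '=', 'O', ')', 'N', ')', 'C', '(', '=', 'O', ')', 'O'] := by decide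
@[simp] lemma tplA_27 : tplA.get? ['Q', '_', 'D'] = some ['N', '[', 'C', '@', '@', 'H', ':', '{', 'i', 'd', 'x', '}', ']', '(', 'C', 'C', 'C', '(', '=', 'O', ')', 'N', ')', 'C', '(', '=', 'O', ')'] := by decide
@[simp] lemma tplA_28 : tplA.get? ['Q', '_', 'D', '_', 't', 'e', 'r', 'm'] = some ['N', '[', 'C', '@', '@', 'H', ':', '{', 'i', 'd', 'x', '}', ']', '(', 'C', 'C', 'C', '(', '=', 'O', ')', 'N', ')', 'C', '(', '=', 'O', ')', 'O'] := by decide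
@[simp] lemma tplA_29 : tplA.get? ['G', '_', 'L'] = some ['N', '[', 'C', ':', '{', 'i', 'd', 'x', '}', ']', 'C', '(', '=', 'O', ')'] := by decide
@[simp] lemma tplA_30 : tplA.get? ['G', '_', 'L', '_', 't', 'e', 'r', 'm'] = some ['N', '[', 'C', ':', '{', 'i', 'd', 'x', '}', ']', 'C', '(', '=', 'O', ')', 'O'] := by decide
@[simp] lemma tplA_31 : tplA.get? ['G', '_', 'D'] = some ['N', '[', 'C', ':', '{', 'i', 'd', 'x', '}', ']', 'C', '(', '=', 'O', ')'] := by decide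
@[simp] lemma tplA_32 : tplA.get? ['G', '_', 'D', '_', 't', 'e', 'r', 'm'] = some ['N', '[', 'C', ':', '{', 'i', 'd', 'x', '}', ']', 'C', '(', '=', 'O', ')', 'O'] := by decide
@[simp] lemma tplA_33 : tplA.get? ['H', '_', 'L'] = some ['N', '[', 'C', '@', 'H', ':', '{', 'i', 'd', 'x', '}', ']', '(', 'C', 'c', '1', 'c', 'n', 'c', '[', 'n', 'H', ']', '1', ')', 'C', '(', '=', 'O', ')'] := by decide
@[simp] lemma tplA_34 : tplA.get? ['H', '_', 'L', '_', 't', 'e', 'r', 'm'] = some ['N', '[', 'C', '@', 'H', ':', '{', 'i', 'd', 'x', '}', ']', '(', 'C', 'c', '1', 'c', 'n', 'c', '[', 'n', 'H', ']', '1', ')', 'C', '(', '=', 'O', ')', 'O'] := by decide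
@[simp] lemma tplA_35 : tplA.get? ['H', '_', 'D'] = some ['N', '[', 'C', '@', '@', 'H', ':', '{', 'i', 'd', 'x', '}', ']', '(', 'C', 'c', '1', 'c', 'n', 'c', '[', 'n', 'H', ']', '1', ')', 'C', '(', '=', 'O', ')'] := by decide
@[simp] lemma tplA_36 : tplA.get? ['H', '_', 'D', '_', 't', 'e', 'r', 'm'] = some ['N', '[', 'C', '@', '@', 'H', ':', '{', 'i', 'd', 'x', '}', ']', '(', 'C', 'c', '1', 'c', 'n', 'c', '[', 'n', 'H', ']', '1', ')', 'C', '(', '=', 'O', ')', 'O'] := by decide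
@[simp] lemma tplA_37 : tplA.get? ['I', '_', 'L'] = some ['N', '[', 'C', '@', 'H', ':', '{', 'i', 'd', 'x', '}', ']', '(', 'C', '(', 'C', ')', 'C', 'C', ')', 'C', '(', '=', 'O', ')'] := by decide
@[simp] lemma tplA_38 : tplA.get? ['I', '_', 'L', '_', 't', 'e', 'r', 'm'] = some ['N', '[', 'C', '@', 'H', ':', '{', 'i', 'd', 'x', '}', ']', '(', 'C', '(', 'C', ')', 'C', 'C', ')', 'C', '(', '=', 'O', ')', 'O'] := by decide
@[simp] lemma tplA_39 : tplA.get? ['I', '_', 'D'] = some ['N', '[', 'C', '@', '@', 'H', ':', '{', 'i', 'd', 'x', '}', ']', '(', 'C', '(', 'C', ')', 'C', 'C', ')', 'C', '(', '=', 'O', ')'] := by decide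
@[simp] lemma tplA_40 : tplA.get? ['I', '_', 'D', '_', 't', 'e', 'r', 'm'] = some ['N', '[', 'C', '@', '@', 'H', ':', '{', 'i', 'd', 'x', '}', ']', '(', 'C', '(', 'C', ')', 'C', 'C', ')', 'C', '(', '=', 'O', ')', 'O'] := by decide
@[simp] lemma tplA_41 : tplA.get? ['L', '_', 'L'] = some ['N', '[', 'C', '@', 'H', ':', '{', 'i', 'd', 'x', '}', ']', '(', 'C', 'C', '(', 'C', ')', 'C', ')', 'C', '(', '=', 'O', ')'] := by decide
@[simp] lemma tplA_42 : tplA.get? ['L', '_', 'L', '_', 't', 'e', 'r', 'm'] = some ['N', '[', 'C', '@', 'H', ':', '{', 'i', 'd', 'x', '}', ']', '(', 'C', 'C', '(', 'C', ')', 'C', ')', 'C', '(', '=', 'O', ')', 'O'] := by decide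
@[simp] lemma tplA_43 : tplA.get? ['L', '_', 'D'] = some ['N', '[', 'C', '@', '@', 'H', ':', '{', 'i', 'd', 'x', '}', ']', '(', 'C', 'C', '(', 'C', ')', 'C', ')', 'C', '(', '=', 'O', ')'] := by decide
@[simp] lemma tplA_44 : tplA.get? ['L', '_', 'D', '_', 't', 'e', 'r', 'm'] = some ['N', '[', 'C', '@', '@', 'H', ':', '{', 'i', 'd', 'x', '}', ']', '(', 'C', 'C', '(', 'C', ')', 'C', ')', 'C', '(', '=', 'O', ')', 'O'] := by decide
@[simp] lemma tplA_45 : tplA.get? ['K', '_', 'L'] = some ['N', '[', 'C', '@', 'H', ':', '{', 'i', 'd', 'x', '}', ']', '(', 'C', 'C', 'C', 'C', 'N', ')', 'C', '(', '=', 'O', ')'] := by decide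
@[simp] lemma tplA_46 : tplA.get? ['K', '_', 'L', '_', 't', 'e', 'r', 'm'] = some ['N', '[', 'C', '@', 'H', ':', '{', 'i', 'd', 'x', '}', ']', '(', 'C', 'C', 'C', 'C', 'N', ')', 'C', '(', '=', 'O', ')', 'O'] := by decide
@[simp] lemma tplA_47 : tplA.get? ['K', '_', 'D'] = some ['N', '[', 'C', '@', '@', 'H', ':', '{', 'i', 'd', 'x', '}', ']', '(', 'C', 'C', 'C', 'C', 'N', ')', 'C', '(', '=', 'O', ')'] := by decide
@[simp] lemma tplA_48 : tplA.get? ['K', '_', 'D', '_', 't', 'e', 'r', 'm'] = some ['N', '[', 'C', '@', '@', 'H', ':', '{', 'i', 'd', 'x', '}', ']', '(', 'C', 'C', 'C', 'C', 'N', ')', 'C', '(', '=', 'O', ')', 'O'] := by decide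
@[simp] lemma tplA_49 : tplA.get? ['M', '_', 'L'] = some ['N', '[', 'C', '@', 'H', ':', '{', 'i', 'd', 'x', '}', ']', '(', 'C', 'C', 'S', 'C', ')', 'C', '(', '=', 'O', ')'] := by decide
@[simp] lemma tplA_50 : tplA.get? ['M', '_', 'L', '_', 't', 'e', 'r', 'm'] = some ['N', '[', 'C', '@', 'H', ':', '{', 'i', 'd', 'x', '}', ']', '(', 'C', 'C', 'S', 'C', ')', 'C', '(', '=', 'O', ')', 'O'] := by decide
@[simp] lemma tplA_51 : tplA.get? ['M', '_', 'D'] = some ['N', '[', 'C', '@', '@', 'H', ':', '{', 'i', 'd', 'x', '}', ']', '(', 'C', 'C', 'S', 'C', ')', 'C', '(', '=', 'O', ')'] := by decide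
@[simp] lemma tplA_52 : tplA.get? ['M', '_', 'D', '_', 't', 'e', 'r', 'm'] = some ['N', '[', 'C', '@', '@', 'H', ':', '{', 'i', 'd', 'x', '}', ']', '(', 'C', 'C', 'S', 'C', ')', 'C', '(', '=', 'O', ')', 'O'] := by decide
@[simp] lemma tplA_53 : tplA.get? ['F', '_', 'L'] = some ['N', '[', 'C', '@', 'H', ':', '{', 'i', 'd', 'x', '}', ']', '(', 'C', 'c', '1', 'c', 'c', 'c', 'c', 'c', '1', ')', 'C', '(', '=', 'O', ')'] := by decide
@[simp] lemma tplA_54 : tplA.get? ['F', '_', 'L', '_', 't', 'e', 'r', 'm'] = some ['N', '[', 'C', '@', 'H', ':', '{', 'i', 'd', 'x', '}', ']', '(', 'C', 'c', '1', 'c', 'c', 'c', 'c', 'c', '1', ')', 'C', '(', '=', 'O', ')', 'O'] := by decide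
@[simp] lemma tplA_55 : tplA.get? ['F', '_', 'D'] = some ['N', '[', 'C', '@', '@', 'H', ':', '{', 'i', 'd', 'x', '}', ']', '(', 'C', 'c', '1', 'c', 'c', 'c', 'c', 'c', '1', ')', 'C', '(', '=', 'O', ')'] := by decide
@[simp] lemma tplA_56 : tplA.get? ['F', '_', 'D', '_', 't', 'e', 'r', 'm'] = some ['N', '[', 'C', '@', '@', 'H', ':', '{', 'i', 'd', 'x', '}', ']', '(', 'C', 'c', '1', 'c', 'c', 'c', 'c', 'c', '1', ')', 'C', '(', '=', 'O', ')', 'O'] := by decide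
@[simp] lemma tplA_57 : tplA.get? ['P', '_', 'L'] = some ['N', '[', 'C', '@', 'H', ':', '{', 'i', 'd', 'x', '}', ']', '(', 'C', '1', 'C', 'C', 'N', '1', ')', 'C', '(', '=', 'O', ')'] := by decide
@[simp] lemma tplA_58 : tplA.get? ['P', '_', 'L', '_', 't', 'e', 'r', 'm'] = some ['N', '[', 'C', '@', 'H', ':', '{', 'i', 'd', 'x', '}', ']', '(', 'C', '1', 'C', 'C', 'N', '1', ')', 'C', '(', '=', 'O', ')', 'O'] := by decide
@[simp] lemma tplA_59 : tplA.get? ['P', '_', 'D'] = some ['N', '[', 'C', '@', '@', 'H', ':', '{', 'i', 'd', 'x', '}', ']', '(', 'C', '1', 'C', 'C', 'N', '1', ')', 'C', '(', '=', 'O', ')'] := by decide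
@[simp] lemma tplA_60 : tplA.get? ['P', '_', 'D', '_', 't', 'e', 'r', 'm'] = some ['N', '[', 'C', '@', '@', 'H', ':', '{', 'i', 'd', 'x', '}', ']', '(', 'C', '1', 'C', 'C', 'N', '1', ')', 'C', '(', '=', 'O', ')', 'O'] := by decide
@[simp] lemma tplA_61 : tplA.get? ['S', '_', 'L'] = some ['N', '[', 'C', '@', 'H', ':', '{', 'i', 'd', 'x', '}', ']', '(', 'C', 'O', ')', 'C', '(', '=', 'O', ')'] := by decide
@[simp] lemma tplA_62 : tplA.get? ['S', '_', 'L', '_', 't', 'e', 'r', 'm'] = some ['N', '[', 'C', '@', 'H', ':', '{', 'i', 'd', 'x', '}', ']', '(', 'C', 'O', ')', 'C', '(', '=', 'O', ')', 'O'] := by decide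
@[simp] lemma tplA_63 : tplA.get? ['S', '_', 'D'] = some ['N', '[', 'C', '@', '@', 'H', ':', '{', 'i', 'd', 'x', '}', ']', '(', 'C', 'O', ')', 'C', '(', '=', 'O', ')'] := by decide
@[simp] lemma tplA_64 : tplA.get? ['S', '_', 'D', '_', 't', 'e', 'r', 'm'] = some ['N', '[', 'C', '@', '@', 'H', ':', '{', 'i', 'd', 'x', '}', ']', '(', 'C', 'O', ')', 'C', '(', '=', 'O', ')', 'O'] := by decide
@[simp] lemma tplA_65 : tplA.get? ['T', '_', 'L'] = some ['N', '[', 'C', '@', 'H', ':', '{', 'i', 'd', 'x', '}', ']', '(', 'C', '(', 'C', ')', 'O', ')', 'C', '(', '=', 'O', ')'] := by decide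
@[simp] lemma tplA_66 : tplA.get? ['T', '_', 'L', '_', 't', 'e', 'r', 'm'] = some ['N', '[', 'C', '@', 'H', ':', '{', 'i', 'd', 'x', '}', ']', '(', 'C', '(', 'C', ')', 'O', ')', 'C', '(', '=', 'O', ')', 'O'] := by decide
@[simp] lemma tplA_67 : tplA.get? ['T', '_', 'D'] = some ['N', '[', 'C', '@', '@', 'H', ':', '{', 'i', 'd', 'x', '}', ']', '(', 'C', '(', 'C', ')', 'O', ')', 'C', '(', '=', 'O', ')'] := by decide
@[simp] lemma tplA_68 : tplA.get? ['T', '_', 'D', '_', 't', 'e', 'r', 'm'] = some ['N', '[', 'C', '@', '@', 'H', ':', '{', 'i', 'd', 'x', '}', ']', '(', 'C', '(', 'C', ')', 'O', ')', 'C', '(', '=', 'O', ')', 'O'] := by decide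
@[simp] lemma tplA_69 : tplA.get? ['W', '_', 'L'] = some ['N', '[', 'C', '@', 'H', ':', '{', 'i', 'd', 'x', '}', ']', '(', 'C', 'c', '1', 'c', '[', 'n', 'H', ']', 'c', '2', 'c', 'c', 'c', 'c', 'c', '1', '2', ')', 'C', '(', '=', 'O', ')'] := by decide
@[simp] lemma tplA_70 : tplA.get? ['W', '_', 'L', '_', 't', 'e', 'r', 'm'] = some ['N', '[', 'C', '@', 'H', ':', '{', 'i', 'd', 'x', '}', ']', '(', 'C', 'c', '1', 'c', '[', 'n', 'H', ']', 'c', '2', 'c', 'c', 'c', 'c', 'c', '1', '2', ')', 'C', '(', '=', 'O', ')', 'O'] := by decide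
@[simp] lemma tplA_71 : tplA.get? ['W', '_', 'D'] = some ['N', '[', 'C', '@', '@', 'H', ':', '{', 'i', 'd', 'x', '}', ']', '(', 'C', 'c', '1', 'c', '[', 'n', 'H', ']', 'c', '2', 'c', 'c', 'c', 'c', 'c', '1', '2', ')', 'C', '(', '=', 'O', ')'] := by decide
@[simp] lemma tplA_72 : tplA.get? ['W', '_', 'D', '_', 't', 'e', 'r', 'm'] = some ['N', '[', 'C', '@', '@', 'H', ':', '{', 'i', 'd', 'x', '}', ']', '(', 'C', 'c', '1', 'c', '[', 'n', 'H', ']', 'c', '2', 'c', 'c', 'c', 'c', 'c', '1', '2', ')', 'C', '(', '=', 'O', ')', 'O'] := by decide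
@[simp] lemma tplA_73 : tplA.get? ['Y', '_', 'L'] = some ['N', '[', 'C', '@', 'H', ':', '{', 'i', 'd', 'x', '}', ']', '(', 'C', 'c', '1', 'c', 'c', 'c', '(', 'O', ')', 'c', 'c', '1', ')', 'C', '(', '=', 'O', ')'] := by decide
@[simp] lemma tplA_74 : tplA.get? ['Y', '_', 'L', '_', 't', 'e', 'r', 'm'] = some ['N', '[', 'C', '@', 'H', ':', '{', 'i', 'd', 'x', '}', ']', '(', 'C', 'c', '1', 'c', 'c', 'c', '(', 'O', ')', 'c', 'c', '1', ')', 'C', '(', '=', 'O', ')', 'O'] := by decide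
@[simp] lemma tplA_75 : tplA.get? ['Y', '_', 'D'] = some ['N', '[', 'C', '@', '@', 'H', ':', '{', 'i', 'd', 'x', '}', ']', '(', 'C', 'c', '1', 'c', 'c', 'c', '(', 'O', ')', 'c', 'c', '1', ')', 'C', '(', '=', 'O', ')'] := by decide
@[simp] lemma tplA_76 : tplA.get? ['Y', '_', 'D', '_', 't', 'e', 'r', 'm'] = some ['N', '[', 'C', '@', '@', 'H', ':', '{', 'i', 'd', 'x', '}', ']', '(', 'C', 'c', '1', 'c', 'c', 'c', '(', 'O', ')', 'c', 'c', '1', ')', 'C', '(', '=', 'O', ')', 'O'] := by decide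
@[simp] lemma tplA_77 : tplA.get? ['V', '_', 'L'] = some ['N', '[', 'C', '@', 'H', ':', '{', 'i', 'd', 'x', '}', ']', '(', 'C', '(', 'C', ')', 'C', ')', 'C', '(', '=', 'O', ')'] := by decide
@[simp] lemma tplA_78 : tplA.get? ['V', '_', 'L', '_', 't', 'e', 'r', 'm'] = some ['N', '[', 'C', '@', 'H', ':', '{', 'i', 'd', 'x', '}', ']', '(', 'C', '(', 'C', ')', 'C', ')', 'C', '(', '=', 'O', ')', 'O'] := by decide
@[simp] lemma tplA_79 : tplA.get? ['V', '_', 'D'] = some ['N', '[', 'C', '@', '@', 'H', ':', '{', 'i', 'd', 'x', '}', ']', '(', 'C', '(', 'C', ')', 'C', ')', 'C', '(', '=', 'O', ')'] := by decide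
@[simp] lemma tplA_80 : tplA.get? ['V', '_', 'D', '_', 't', 'e', 'r', 'm'] = some ['N', '[', 'C', '@', '@', 'H', ':', '{', 'i', 'd', 'x', '}', ']', '(', 'C', '(', 'C', ')', 'C', ')', 'C', '(', '=', 'O', ')', 'O'] := by decide

lemma piece_eq (c : Char) (hc : c ∈ allowedChars)
    (i : Int) (t : Bool) : pieceA c i t = residueB c i t := by
  fin_cases hc <;> cases t <;>
    simp [pieceA, residueB, PySem.Chars.upperChar, PySem.Chars.isupper, PySem.Chars.islower,
      PySem.Chars.replace, PySem.Chars.replace.go, List.isPrefixOf, aaSide,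
      PySem.Dict.getD_eq_get?_getD, PySem.Dict.get?_mk_cons]

-- ===== VERDICT (by name: the statement is the Claim_ definition above) =====
theorem build_peptide_smiles_spec : Claim_equal_build_peptide_smiles := by
  intro seq _ hpre
  unfold Pre_build_peptide_smiles at hpre
  have hpre' : ∀ c ∈ seq.toList, c ∈ allowedChars := by
    intro c hc
    simpa [List.contains_iff_mem] using List.all_eq_true.1 hpre c hc
  unfold Spec_build_peptide_smiles build_peptide_smiles build_peptide_smiles_alt
  by_cases h : seq.toList = []
  · simp [h, PySem.Chars.join, List.intercalate]
  · rw [if_neg h, PySem.List.foldl_append_singleton_eq_map, List.nil_append]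
    have hm : (PySem.List.enumerate seq.toList 1).map
        (fun p => pieceA p.2 p.1 (decide (p.1 = (seq.toList.length : Int)))) =
      (PySem.List.enumerate seq.toList 1).map
        (fun p => residueB p.2 p.1 (decide (p.1 = (seq.toList.length : Int)))) := by
      apply List.map_congr_left
      intro p hp
      rcases (PySem.List.mem_enumerate_iff _ _ _).1 hp with ⟨k, hk, rfl⟩
      exact piece_eq _ (hpre' _ (List.getElem_mem hk)) _ _
    rw [hm]
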